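-- pv_equiv track=rewrite | github.com/k1monfared/notes | blog/files/20251201/general_formula.py | count_rolls_with_dice_values
-- ===== SOURCE A (Python) =====
-- from itertools import product, combinations
--
-- def count_rolls_with_dice_values(required_values):
--     """
--     Count rolls (d1,d2,d3,d4) that contain the required dice values.
--
--     required_values: dict like {1: 2, 2: 1} means "at least two 1's and at least one 2"
--     """
--     # Use inclusion-exclusion on which values are MISSING
--     # This is complex for general multisets, so we'll enumerate
--
--     count = 0
--     for roll in product(range(1, 7), repeat=4):
--         # Count occurrences of each value in the roll
--         roll_counts = {}
--         for die in roll: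
--             roll_counts[die] = roll_counts.get(die, 0) + 1
--
--         # Check if roll satisfies requirements
--         satisfies = True
--         for value, min_count in required_values.items():
--             if roll_counts.get(value, 0) < min_count:
--                 satisfies = False
--                 break
--
--         if satisfies:
--             count += 1
--
--     return count
-- ===== SOURCE B (Python) =====
-- def count_rolls_with_dice_values(required_values):
--     need = [0, 0, 0, 0, 0, 0]
--     for v, m in required_values.items():
--         if m > 0:
--             if v < 1 or v > 6:
--                 return 0
--             need[v - 1] = m
--     if sum(need) > 4:
--         return 0
--
--     def comb(n, k):
--         c = 1
--         for i in range(k):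
--             c = c * (n - i) // (i + 1)
--         return c
--
--     def ways(faces, k):
--         if not faces:
--             return 1 if k == 0 else 0
--         total = 0
--         for c in range(faces[0], k + 1):
--             total += comb(k, c) * ways(faces[1:], k - c)
--         return total
--
--     return ways(need, 4)
-- ===== Notes on version B (the rewrite author's own statement) =====
-- stated objective: alternative
-- what changed: Replaces A's brute-force enumeration of all 1296 rolls (building a count dict and checking every requirement per roll) by a combinatorial computation: normalize the dict into six per-face minimum counts (returning 0 early for an out-of-range positive requirement or a requirement sum above 4), then count the rolls face by face with binomial coefficients.
import Mathlib
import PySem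

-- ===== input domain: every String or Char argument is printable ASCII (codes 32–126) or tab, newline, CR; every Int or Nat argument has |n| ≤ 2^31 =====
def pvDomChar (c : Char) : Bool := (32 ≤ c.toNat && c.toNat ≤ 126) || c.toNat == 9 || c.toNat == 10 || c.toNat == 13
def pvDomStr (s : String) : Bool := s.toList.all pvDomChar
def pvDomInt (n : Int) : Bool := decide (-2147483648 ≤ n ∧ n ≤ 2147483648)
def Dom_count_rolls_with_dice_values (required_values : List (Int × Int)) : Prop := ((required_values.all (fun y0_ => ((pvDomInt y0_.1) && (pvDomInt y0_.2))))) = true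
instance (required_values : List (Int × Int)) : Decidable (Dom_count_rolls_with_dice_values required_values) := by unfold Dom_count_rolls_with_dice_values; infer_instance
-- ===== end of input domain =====

-- B replaces A's enumeration of all 6^4 rolls by a combinatorial count: normalize the
-- requirements into per-face minimum counts, then count assignments face by face with
-- binomial coefficients (objective: alternative algorithm; constant-size combinatorial computation).

-- ===== PORT A =====
-- the 'for value, min_count in required_values.items(): ... break' check loop of A
def pvSatLoop (roll_counts : PySem.Dict Int Int) : List (Int × Int) → Bool
  | [] => true
  | (value, min_count) :: rest =>
      if roll_counts.getD value 0 < min_count then false else pvSatLoop roll_counts rest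

def count_rolls_with_dice_values (required_values : List (Int × Int)) : Int :=
  let d := PySem.Dict.ofList required_values   -- the Python function receives the pairs as a dict
  -- for roll in product(range(1, 7), repeat=4):
  ((PySem.List.pyRange 1 7 1).flatMap (fun d1 =>
    (PySem.List.pyRange 1 7 1).flatMap (fun d2 =>
      (PySem.List.pyRange 1 7 1).flatMap (fun d3 =>
        (PySem.List.pyRange 1 7 1).map (fun d4 => [d1, d2, d3, d4]))))).foldl
    (fun count roll =>
      -- roll_counts[die] = roll_counts.get(die, 0) + 1
      let roll_counts := roll.foldl (fun rc die => rc.modify die 0 (· + 1)) PySem.Dict.empty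
      if pvSatLoop roll_counts d.items then count + 1 else count) 0

-- ===== PORT B =====
-- the 'c = c * (n - i) // (i + 1)' loop of Source B's comb
def pvComb (n k : Int) : Int :=
  (PySem.List.pyRange 0 k 1).foldl (fun c i => PySem.Int.floordiv (c * (n - i)) (i + 1)) 1

-- Source B's ways: distribute k dice over the remaining faces, binomial coefficient per face
def pvWays : List Int → Int → Int
  | [], k => if k == 0 then 1 else 0
  | f0 :: rest, k =>
      (PySem.List.pyRange f0 (k + 1) 1).foldl
        (fun total c => total + pvComb k c * pvWays rest (k - c)) 0

-- Source B's normalization loop: need[v-1] = m for positive requirements; none = early 'return 0'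
def pvNormLoop : List (Int × Int) → List Int → Option (List Int)
  | [], need => some need
  | (v, m) :: rest, need =>
      if 0 < m then
        if v < 1 ∨ 6 < v then none
        else pvNormLoop rest (need.set (v - 1).toNat m)
      else pvNormLoop rest need

def count_rolls_with_dice_values_alt (required_values : List (Int × Int)) : Int :=
  match pvNormLoop (PySem.Dict.ofList required_values).items [0, 0, 0, 0, 0, 0] with
  | none => 0
  | some need => if 4 < need.sum then 0 else pvWays need 4

-- ===== PRECONDITION & SPEC =====
def Spec_count_rolls_with_dice_values (required_values : List (Int × Int)) (out : Int) : Prop := out = count_rolls_with_dice_values_alt required_values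
instance (required_values : List (Int × Int)) (out : Int) : Decidable (Spec_count_rolls_with_dice_values required_values out) := by unfold Spec_count_rolls_with_dice_values; infer_instance

-- ===== CLAIM (what is proved, stated in full; the proofs are below) =====
def Claim_equal_count_rolls_with_dice_values : Prop := ∀ (required_values : List (Int × Int)), Dom_count_rolls_with_dice_values required_values → Spec_count_rolls_with_dice_values required_values (count_rolls_with_dice_values required_values)

-- ===== LEMMAS AND PROOFS =====
def pvRollsN : Nat → List (List Int)
  | 0 => [[]]
  | k + 1 => (PySem.List.pyRange 1 7 1).flatMap (fun x => (pvRollsN k).map (x :: ·))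
def Rdie : Nat → Nat → Nat → Nat → Nat → Nat → Nat → Nat
  | 0, a, b, c, d, e, f => if a = 0 ∧ b = 0 ∧ c = 0 ∧ d = 0 ∧ e = 0 ∧ f = 0 then 1 else 0
  | k + 1, a, b, c, d, e, f =>
      Rdie k (a - 1) b c d e f + Rdie k a (b - 1) c d e f + Rdie k a b (c - 1) d e f +
      Rdie k a b c (d - 1) e f + Rdie k a b c d (e - 1) f + Rdie k a b c d e (f - 1)
def pvThresh (a b c d e f : Nat) (r : List Int) : Bool :=
  decide (a ≤ List.count 1 r ∧ b ≤ List.count 2 r ∧ c ≤ List.count 3 r ∧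
          d ≤ List.count 4 r ∧ e ≤ List.count 5 r ∧ f ≤ List.count 6 r)



theorem thresh_cons_1 (a b c d e f : Nat) (r : List Int) :
    pvThresh a b c d e f ((1 : Int) :: r) = pvThresh (a - 1) b c d e f r := by
  simp only [pvThresh, List.count_cons]
  norm_num

theorem thresh_cons_2 (a b c d e f : Nat) (r : List Int) :
    pvThresh a b c d e f ((2 : Int) :: r) = pvThresh a (b - 1) c d e f r := by
  simp only [pvThresh, List.count_cons]
  norm_num

theorem thresh_cons_3 (a b c d e f : Nat) (r : List Int) :
    pvThresh a b c d e f ((3 : Int) :: r) = pvThresh a b (c - 1) d e f r := by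
  simp only [pvThresh, List.count_cons]
  norm_num

theorem thresh_cons_4 (a b c d e f : Nat) (r : List Int) :
    pvThresh a b c d e f ((4 : Int) :: r) = pvThresh a b c (d - 1) e f r := by
  simp only [pvThresh, List.count_cons]
  norm_num

theorem thresh_cons_5 (a b c d e f : Nat) (r : List Int) :
    pvThresh a b c d e f ((5 : Int) :: r) = pvThresh a b c d (e - 1) f r := by
  simp only [pvThresh, List.count_cons]
  norm_num

theorem thresh_cons_6 (a b c d e f : Nat) (r : List Int) :
    pvThresh a b c d e f ((6 : Int) :: r) = pvThresh a b c d e (f - 1) r := by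
  simp only [pvThresh, List.count_cons]
  norm_num

theorem countP_rollsN_base (a b c d e f : Nat) :
    (pvRollsN 0).countP (pvThresh a b c d e f) = Rdie 0 a b c d e f := by
  simp only [pvRollsN, List.countP_cons, List.countP_nil, pvThresh, Rdie, List.count_nil,
    decide_eq_true_eq]
  split_ifs <;> omega

theorem countP_rollsN (k a b c d e f : Nat) :
    (pvRollsN k).countP (pvThresh a b c d e f) = Rdie k a b c d e f := by
  induction k generalizing a b c d e f with
  | zero => exact countP_rollsN_base a b c d e f
  | succ k ih =>
      have hr : PySem.List.pyRange 1 7 1 = [1, 2, 3, 4, 5, 6] := by decide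
      rw [pvRollsN, hr]
      simp only [List.flatMap_cons, List.flatMap_nil, List.countP_append, List.countP_map,
        List.append_nil, Function.comp_def, thresh_cons_1, thresh_cons_2, thresh_cons_3,
        thresh_cons_4, thresh_cons_5, thresh_cons_6, ih]
      rw [Rdie]; omega

def pvRollsA : List (List Int) :=
  (PySem.List.pyRange 1 7 1).flatMap (fun d1 =>
    (PySem.List.pyRange 1 7 1).flatMap (fun d2 =>
      (PySem.List.pyRange 1 7 1).flatMap (fun d3 =>
        (PySem.List.pyRange 1 7 1).map (fun d4 => [d1, d2, d3, d4]))))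

theorem mem_pvRollsA {r : List Int} (h : r ∈ pvRollsA) :
    ∃ x1 x2 x3 x4 : Int, r = [x1, x2, x3, x4] ∧ ∀ x ∈ r, 1 ≤ x ∧ x ≤ 6 := by
  simp only [pvRollsA, List.mem_flatMap, List.mem_map, PySem.List.mem_pyRange_one] at h
  obtain ⟨x1, h1, x2, h2, x3, h3, x4, h4, hr⟩ := h
  exact ⟨x1, x2, x3, x4, hr.symm, by subst hr; simp_all; omega⟩

theorem sum_counts_roll (r : List Int) (h : ∀ x ∈ r, 1 ≤ x ∧ x ≤ 6) :
    List.count 1 r + List.count 2 r + List.count 3 r + List.count 4 r +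
      List.count 5 r + List.count 6 r = r.length := by
  induction r with
  | nil => simp
  | cons x t ih =>
      obtain ⟨hx1, hx2⟩ := h x (List.mem_cons_self)
      have ht := ih (fun y hy => h y (List.mem_cons_of_mem x hy))
      interval_cases x <;> simp [List.count_cons] <;> omega

theorem pigeonhole (a b c d e f : Nat) (h : 4 < a + b + c + d + e + f) :
    pvRollsA.countP (pvThresh a b c d e f) = 0 := by
  rw [List.countP_eq_zero]
  intro r hr
  obtain ⟨x1, x2, x3, x4, hshape, hmem⟩ := mem_pvRollsA hr
  have hlen : r.length = 4 := by rw [hshape]; rfl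
  have hsum := sum_counts_roll r hmem
  simp only [pvThresh, decide_eq_true_eq]
  rintro ⟨h1, h2, h3, h4, h5, h6⟩
  omega

set_option maxRecDepth 100000 in
theorem pvRollsA_eq : pvRollsA = pvRollsN 4 := by decide



theorem satLoop_eq_all (rc : PySem.Dict Int Int) (l : List (Int × Int)) :
    pvSatLoop rc l = l.all (fun q => !(rc.getD q.1 0 < q.2)) := by
  induction l with
  | nil => rfl
  | cons p rest ih =>
      obtain ⟨v, m⟩ := p
      simp only [pvSatLoop, List.all_cons, ih]
      split <;> simp_all

def pvNeed (d : PySem.Dict Int Int) (f : Int) : Nat := (max (d.getD f 0) 0).toNat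

theorem counts_getD (roll : List Int) (v : Int) :
    (roll.foldl (fun rc die => rc.modify die 0 (· + 1)) PySem.Dict.empty).getD v 0
      = (List.count v roll : Int) := by
  rw [PySem.Dict.getD_foldl_modify_add_one]
  simp


theorem sat_iff (d : PySem.Dict Int Int) (hnd : d.keys.Nodup)
    (hgood : ∀ p ∈ d.items, 0 < p.2 → 1 ≤ p.1 ∧ p.1 ≤ 6) (roll : List Int) :
    pvSatLoop (roll.foldl (fun rc die => rc.modify die 0 (· + 1)) PySem.Dict.empty) d.items
      = pvThresh (pvNeed d 1) (pvNeed d 2) (pvNeed d 3) (pvNeed d 4) (pvNeed d 5) (pvNeed d 6) roll := by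
  rw [satLoop_eq_all, Bool.eq_iff_iff]
  simp only [List.all_eq_true, pvThresh, decide_eq_true_eq, Bool.not_eq_true',
    decide_eq_false_iff_not, not_lt, counts_getD]
  constructor
  · intro H
    have hface : ∀ f : Int, pvNeed d f ≤ List.count f roll := by
      intro f
      by_cases hf : f ∈ d.keys
      · have hex : ∃ p ∈ d.items, p.1 = f := by
          simpa [PySem.Dict.keys, List.mem_map] using hf
        obtain ⟨⟨v, m⟩, hp, hpf⟩ := hex
        subst hpf
        have hget : d.getD v 0 = m := PySem.Dict.getD_of_mem_items d hp hnd 0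
        have hle : m ≤ (List.count v roll : Int) := by simpa using H (v, m) hp
        unfold pvNeed
        rw [hget]
        show (max m 0).toNat ≤ List.count v roll
        omega
      · have hnone : d.get? f = none := (PySem.Dict.get?_eq_none_iff_not_mem_keys d f).mpr hf
        unfold pvNeed
        rw [PySem.Dict.getD_eq_get?_getD, hnone]
        simp
    exact ⟨hface 1, hface 2, hface 3, hface 4, hface 5, hface 6⟩
  · rintro ⟨h1, h2, h3, h4, h5, h6⟩ ⟨v, m⟩ hp
    simp only
    by_cases hm : 0 < m
    · obtain ⟨hv1, hv2⟩ := hgood _ hp hm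
      have hget : d.getD v 0 = m := PySem.Dict.getD_of_mem_items d hp hnd 0
      have hsel : pvNeed d v ≤ List.count v roll := by
        interval_cases v
        · exact h1
        · exact h2
        · exact h3
        · exact h4
        · exact h5
        · exact h6
      unfold pvNeed at hsel
      rw [hget] at hsel
      omega
    · have := Int.natCast_nonneg (List.count v roll)
      omega

theorem sat_false_of_bad (d : PySem.Dict Int Int) (p0 : Int × Int) (hp0 : p0 ∈ d.items)
    (hm : 0 < p0.2) (hv : p0.1 < 1 ∨ 6 < p0.1) (roll : List Int)
    (hroll : ∀ x ∈ roll, 1 ≤ x ∧ x ≤ 6) :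
    pvSatLoop (roll.foldl (fun rc die => rc.modify die 0 (· + 1)) PySem.Dict.empty) d.items
      = false := by
  rw [satLoop_eq_all, List.all_eq_false]
  refine ⟨p0, hp0, ?_⟩
  have hcnt : List.count p0.1 roll = 0 :=
    List.count_eq_zero.mpr (fun hmem => by rcases hroll _ hmem with ⟨ha, hb⟩; omega)
  simp only [counts_getD, hcnt, Bool.not_eq_true', decide_eq_false_iff_not, not_lt, not_le]
  push_cast
  omega

theorem normLoop_none (l : List (Int × Int)) (p0 : Int × Int) (hp0 : p0 ∈ l) (hm : 0 < p0.2)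
    (hv : p0.1 < 1 ∨ 6 < p0.1) : ∀ acc, pvNormLoop l acc = none := by
  induction l with
  | nil => simp at hp0
  | cons q rest ih =>
      intro acc
      obtain ⟨v, m⟩ := q
      rcases List.mem_cons.mp hp0 with h | h
      · rw [pvNormLoop]
        have hm' : 0 < m := by rw [h] at hm; exact hm
        have hv' : v < 1 ∨ 6 < v := by rw [h] at hv; exact hv
        rw [if_pos hm', if_pos hv']
      · rw [pvNormLoop]
        split_ifs with h1 h2
        · rfl
        · exact ih h _
        · exact ih h _

theorem normLoop_some (l : List (Int × Int)) : ∀ (acc : List Int), acc.length = 6 →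
    (∀ p ∈ l, 0 < p.2 → 1 ≤ p.1 ∧ p.1 ≤ 6) → (l.map Prod.fst).Nodup →
    pvNormLoop l acc = some ((List.range 6).map (fun (j : Nat) =>
      match l.find? (fun p => p.1 == ((j : Int) + 1)) with
      | some p => if 0 < p.2 then p.2 else acc.getD j 0
      | none => acc.getD j 0)) := by
  induction l with
  | nil =>
      intro acc hlen _ _
      simp only [pvNormLoop, List.find?_nil, Option.some.injEq]
      apply List.ext_getElem (by simp [hlen])
      intro i h1 h2
      simp [List.getD, List.getElem?_eq_getElem h1]
  | cons q rest ih =>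
      intro acc hlen hgood hnd
      obtain ⟨v, m⟩ := q
      simp only [List.map_cons, List.nodup_cons, List.mem_map] at hnd
      obtain ⟨hvnot, hndr⟩ := hnd
      by_cases hm : 0 < m
      · obtain ⟨hv1, hv2⟩ := hgood _ List.mem_cons_self hm
        rw [pvNormLoop, if_pos hm, if_neg (by omega)]
        rw [ih _ (by simp [hlen]) (fun p hp h => hgood p (List.mem_cons_of_mem _ hp) h) hndr]
        congr 1
        apply List.map_congr_left
        intro j hj
        have hj6 : j < 6 := List.mem_range.mp hj
        by_cases hvj : v = (j : Int) + 1
        · have hfr : rest.find? (fun p => p.1 == ((j : Int) + 1)) = none :=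
            List.find?_eq_none.mpr (fun p hp => by
              simp only [beq_iff_eq]
              intro hc
              exact hvnot ⟨p, hp, by omega⟩)
          have hfc : ((v, m) :: rest).find? (fun p => p.1 == ((j : Int) + 1)) = some (v, m) := by
            simp [List.find?_cons, hvj]
          rw [hfr, hfc]
          simp only [hfr]
          have hidx : (v - 1).toNat = j := by omega
          rw [hidx, if_pos hm]
          simp [List.getD, List.getElem?_set_self, hlen, hj6]
        · have hfc : ((v, m) :: rest).find? (fun p => p.1 == ((j : Int) + 1))
              = rest.find? (fun p => p.1 == ((j : Int) + 1)) := by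
            simp [List.find?_cons, hvj]
          rw [hfc]
          have hidx : (v - 1).toNat ≠ j := by omega
          have hacc : (acc.set (v - 1).toNat m)[j]?.getD 0 = acc[j]?.getD 0 := by
            rw [List.getElem?_set_ne hidx]
          simp only [Int.pred_toNat] at hacc
          cases hfr : rest.find? (fun p => p.1 == ((j : Int) + 1)) with
          | none => simp only [List.getD]; simp [hacc]
          | some p => simp only [List.getD]; simp [hacc]
      · rw [pvNormLoop, if_neg hm]
        rw [ih _ hlen (fun p hp h => hgood p (List.mem_cons_of_mem _ hp) h) hndr]
        congr 1
        apply List.map_congr_left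
        intro j hj
        by_cases hvj : v = (j : Int) + 1
        · have hfr : rest.find? (fun p => p.1 == ((j : Int) + 1)) = none :=
            List.find?_eq_none.mpr (fun p hp => by
              simp only [beq_iff_eq]
              intro hc
              exact hvnot ⟨p, hp, by omega⟩)
          have hfc : ((v, m) :: rest).find? (fun p => p.1 == ((j : Int) + 1)) = some (v, m) := by
            simp [List.find?_cons, hvj]
          rw [hfr, hfc]
          simp [hm]
        · have hfc : ((v, m) :: rest).find? (fun p => p.1 == ((j : Int) + 1))
              = rest.find? (fun p => p.1 == ((j : Int) + 1)) := by
            simp [List.find?_cons, hvj]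
          rw [hfc]

theorem find?_getD (d : PySem.Dict Int Int) (hnd : d.keys.Nodup) (f : Int) :
    (match d.items.find? (fun p => p.1 == f) with
      | some p => if 0 < p.2 then p.2 else 0
      | none => (0 : Int)) = max (d.getD f 0) 0 := by
  cases hf : d.items.find? (fun p => p.1 == f) with
  | some p =>
      obtain ⟨pv, pm⟩ := p
      have hpf : pv = f := by simpa using List.find?_some hf
      have hp : (pv, pm) ∈ d.items := List.mem_of_find?_eq_some hf
      have hget : d.getD f 0 = pm := by
        rw [← hpf]
        exact PySem.Dict.getD_of_mem_items d hp hnd 0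
      rw [hget]
      simp only
      split_ifs <;> omega
  | none =>
      have hfk : f ∉ d.keys := by
        rw [List.find?_eq_none] at hf
        simp only [PySem.Dict.keys, List.mem_map]
        rintro ⟨p, hp, hpf⟩
        exact hf p hp (by simpa using hpf)
      have hnone : d.get? f = none := (PySem.Dict.get?_eq_none_iff_not_mem_keys d f).mpr hfk
      rw [PySem.Dict.getD_eq_get?_getD, hnone]
      simp

set_option maxHeartbeats 1000000 in
theorem pvFin_check : ∀ (a b c d e f : Fin 5),
    a.1 + b.1 + c.1 + d.1 + e.1 + f.1 ≤ 4 →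
    (Rdie 4 a.1 b.1 c.1 d.1 e.1 f.1 : Int) = pvWays [(a.1 : Int), b.1, c.1, d.1, e.1, f.1] 4 := by
  decide

theorem entry_eval (d : PySem.Dict Int Int) (hnd : d.keys.Nodup) (j : Nat) (hj : j < 6) :
    (match d.items.find? (fun p => p.1 == ((j : Int) + 1)) with
      | some p => if 0 < p.2 then p.2 else ([0, 0, 0, 0, 0, 0] : List Int).getD j 0
      | none => ([0, 0, 0, 0, 0, 0] : List Int).getD j 0) = max (d.getD ((j : Int) + 1) 0) 0 := by
  have hacc : ([0, 0, 0, 0, 0, 0] : List Int).getD j 0 = 0 := by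
    interval_cases j <;> rfl
  rw [hacc]
  exact find?_getD d hnd ((j : Int) + 1)

-- ===== VERDICT (by name: the statement is the Claim_ definition above) =====
set_option maxRecDepth 100000 in
theorem count_rolls_with_dice_values_spec : Claim_equal_count_rolls_with_dice_values := by
  intro rv _
  unfold Spec_count_rolls_with_dice_values
  have hnd : (PySem.Dict.ofList rv).keys.Nodup := PySem.Dict.nodup_keys_ofList rv
  have hnd' : ((PySem.Dict.ofList rv).items.map Prod.fst).Nodup := by
    simpa [PySem.Dict.keys] using hnd
  have hA : count_rolls_with_dice_values rv =
      ((pvRollsA.countP (fun roll =>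
        pvSatLoop (roll.foldl (fun rc die => rc.modify die 0 (· + 1)) PySem.Dict.empty)
          (PySem.Dict.ofList rv).items) : Nat) : Int) := by
    simp only [count_rolls_with_dice_values]
    rw [show ((PySem.List.pyRange 1 7 1).flatMap (fun d1 =>
      (PySem.List.pyRange 1 7 1).flatMap (fun d2 =>
        (PySem.List.pyRange 1 7 1).flatMap (fun d3 =>
          (PySem.List.pyRange 1 7 1).map (fun d4 => [d1, d2, d3, d4]))))) = pvRollsA from rfl]
    rw [PySem.List.foldl_count_if (fun roll =>
      pvSatLoop (List.foldl (fun rc die => rc.modify die 0 fun x => x + 1) PySem.Dict.empty roll)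
        (PySem.Dict.ofList rv).items) pvRollsA 0]
    simp
  by_cases hbad : ∃ p ∈ (PySem.Dict.ofList rv).items, 0 < p.2 ∧ (p.1 < 1 ∨ 6 < p.1)
  · obtain ⟨p0, hp0, hm0, hv0⟩ := hbad
    rw [hA]
    have hz : pvRollsA.countP (fun roll =>
        pvSatLoop (roll.foldl (fun rc die => rc.modify die 0 (· + 1)) PySem.Dict.empty)
          (PySem.Dict.ofList rv).items) = 0 := by
      rw [List.countP_eq_zero]
      intro r hr
      obtain ⟨x1, x2, x3, x4, hshape, hmem⟩ := mem_pvRollsA hr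
      rw [sat_false_of_bad (PySem.Dict.ofList rv) p0 hp0 hm0 hv0 r hmem]
      simp
    rw [hz]
    unfold count_rolls_with_dice_values_alt
    rw [normLoop_none (PySem.Dict.ofList rv).items p0 hp0 hm0 hv0]
    rfl
  · have hgood : ∀ p ∈ (PySem.Dict.ofList rv).items, 0 < p.2 → 1 ≤ p.1 ∧ p.1 ≤ 6 := by
      intro p hp hm
      push_neg at hbad
      have := hbad p hp
      omega
    rw [hA]
    have hpred : (fun roll =>
        pvSatLoop (roll.foldl (fun rc die => rc.modify die 0 (· + 1)) PySem.Dict.empty)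
          (PySem.Dict.ofList rv).items)
        = pvThresh (pvNeed (PySem.Dict.ofList rv) 1) (pvNeed (PySem.Dict.ofList rv) 2)
            (pvNeed (PySem.Dict.ofList rv) 3) (pvNeed (PySem.Dict.ofList rv) 4)
            (pvNeed (PySem.Dict.ofList rv) 5) (pvNeed (PySem.Dict.ofList rv) 6) :=
      funext (sat_iff (PySem.Dict.ofList rv) hnd hgood)
    rw [hpred]
    have hneed : pvNormLoop (PySem.Dict.ofList rv).items [0, 0, 0, 0, 0, 0]
        = some [max ((PySem.Dict.ofList rv).getD 1 0) 0, max ((PySem.Dict.ofList rv).getD 2 0) 0,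
                max ((PySem.Dict.ofList rv).getD 3 0) 0, max ((PySem.Dict.ofList rv).getD 4 0) 0,
                max ((PySem.Dict.ofList rv).getD 5 0) 0, max ((PySem.Dict.ofList rv).getD 6 0) 0] := by
      rw [normLoop_some (PySem.Dict.ofList rv).items [0, 0, 0, 0, 0, 0] rfl hgood hnd']
      congr 1
      rw [show List.range 6 = [0, 1, 2, 3, 4, 5] from rfl]
      simp only [List.map_cons, List.map_nil]
      rw [entry_eval _ hnd 0 (by norm_num), entry_eval _ hnd 1 (by norm_num),
          entry_eval _ hnd 2 (by norm_num), entry_eval _ hnd 3 (by norm_num),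
          entry_eval _ hnd 4 (by norm_num), entry_eval _ hnd 5 (by norm_num)]
      norm_num
    unfold count_rolls_with_dice_values_alt
    rw [hneed]
    have hM : ∀ f : Int, max ((PySem.Dict.ofList rv).getD f 0) 0
        = ((pvNeed (PySem.Dict.ofList rv) f : Nat) : Int) := by
      intro f
      unfold pvNeed
      omega
    simp only [hM]
    by_cases hsum : 4 < pvNeed (PySem.Dict.ofList rv) 1 + pvNeed (PySem.Dict.ofList rv) 2 +
        pvNeed (PySem.Dict.ofList rv) 3 + pvNeed (PySem.Dict.ofList rv) 4 +
        pvNeed (PySem.Dict.ofList rv) 5 + pvNeed (PySem.Dict.ofList rv) 6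
    · rw [pigeonhole _ _ _ _ _ _ hsum]
      rw [if_pos (by simp [List.sum_cons]; push_cast; omega)]
      rfl
    · rw [if_neg (by simp [List.sum_cons]; push_cast; omega)]
      rw [pvRollsA_eq, countP_rollsN]
      push_neg at hsum
      have hb1 : pvNeed (PySem.Dict.ofList rv) 1 < 5 := by omega
      have hb2 : pvNeed (PySem.Dict.ofList rv) 2 < 5 := by omega
      have hb3 : pvNeed (PySem.Dict.ofList rv) 3 < 5 := by omega
      have hb4 : pvNeed (PySem.Dict.ofList rv) 4 < 5 := by omega
      have hb5 : pvNeed (PySem.Dict.ofList rv) 5 < 5 := by omega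
      have hb6 : pvNeed (PySem.Dict.ofList rv) 6 < 5 := by omega
      exact pvFin_check ⟨_, hb1⟩ ⟨_, hb2⟩ ⟨_, hb3⟩ ⟨_, hb4⟩ ⟨_, hb5⟩ ⟨_, hb6⟩ (by simpa using hsum)
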